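-- pv_equiv track=rewrite | github.com/cov-lineages/pangolin | pangolin/scripts/find_all_snps.py | find_snps
-- ===== SOURCE A (Python) =====
-- def find_snps(ref,member):
--     """Identifies unambiguous snps between two sequences
--     and returns them as a list, using position in the ref seq (i.e. no gaps in ref)"""
--     snps = []
--     index = 0
--     for i in range(len(ref)):
--         if ref[i]!= '-':
--             index +=1
--
--         col = [ref[i],member[i]]
--         if len(set(col))>1:
--             if not col[1].lower() in ["a","g","t","c","-"]:
--                 pass
--             else:
--                 snp = f"{index}{col[0].upper()}{col[1].upper()}"
--                 snps.append(snp)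
--     return snps
-- ===== SOURCE B (Python) =====
-- def find_snps(ref, member):
--     """Identifies unambiguous snps between two sequences
--     and returns them as a list, using position in the ref seq (i.e. no gaps in ref)"""
--     # Stateless: the reference position of alignment column i is a closed form,
--     # i + 1 minus the number of gaps in ref[:i+1]; no running counter is carried.
--     return [f"{i + 1 - ref[:i + 1].count('-')}{r.upper()}{m.upper()}"
--             for i, (r, m) in enumerate(zip(ref, member))
--             if r != m and m.lower() in "agtc-"]
-- ===== Notes on version B (the rewrite author's own statement) =====
-- stated objective: alternative
-- what changed: Replaces A's fused loop that mutates a running non-gap counter and appends to a list with a stateless single comprehension in which the reference position of column i is computed by the closed form i+1-ref[:i+1].count('-'); no accumulator, no set([...])/list construction per column.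
import Mathlib
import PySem

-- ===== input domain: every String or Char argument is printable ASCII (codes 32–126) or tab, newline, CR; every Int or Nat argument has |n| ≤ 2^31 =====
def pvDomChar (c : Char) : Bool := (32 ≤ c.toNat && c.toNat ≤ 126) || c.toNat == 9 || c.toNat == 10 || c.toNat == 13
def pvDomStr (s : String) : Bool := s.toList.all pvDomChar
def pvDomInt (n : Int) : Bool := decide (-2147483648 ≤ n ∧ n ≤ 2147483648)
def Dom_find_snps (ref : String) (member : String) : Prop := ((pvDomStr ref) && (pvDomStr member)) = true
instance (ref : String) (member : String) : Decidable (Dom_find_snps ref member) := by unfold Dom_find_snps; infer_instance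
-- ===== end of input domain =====

-- B replaces A's fused loop with a running non-gap counter by one stateless comprehension whose reference position is the closed form i+1-ref[:i+1].count('-'); equivalence of RETURN values is proved on Pre_ (member at least as long as ref; A raises IndexError otherwise; B's zip truncates there).


-- ===== PORT A =====
-- A: one fused loop over range(len(ref)) carrying (snps, index); member[i] is pyGetD (in range under Pre_).
def find_snps (ref : String) (member : String) : List String :=
  let r := ref.toList
  let m := member.toList
  ((PySem.List.pyRange 0 r.length 1).foldl
    (fun (st : List String × Int) i =>
      let index := if PySem.List.pyGetD r i ' ' ≠ '-' then st.2 + 1 else st.2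
      let c0 := PySem.List.pyGetD r i ' '
      let c1 := PySem.List.pyGetD m i ' '
      if (PySem.Set.ofList [c0, c1]).length > 1 then
        if ¬ (PySem.Chars.lowerChar c1 ∈ ['a', 'g', 't', 'c', '-']) then
          (st.1, index)
        else
          (st.1 ++ [String.ofList (PySem.Int.toChars index ++ [PySem.Chars.upperChar c0, PySem.Chars.upperChar c1])], index)
      else (st.1, index))
    ([], 0)).1

-- ===== PORT B =====
-- Source B's single comprehension over enumerate(zip(ref, member)); the reference position is the
-- closed form i + 1 - ref[:i+1].count('-') (slice then count, as in Source B); membership of the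
-- single character m.lower() in the string "agtc-" equals membership in its character list.
def find_snps_alt (ref : String) (member : String) : List String :=
  let r := ref.toList
  let m := member.toList
  (PySem.List.enumerate (r.zip m) 0).filterMap (fun p =>
    if p.2.1 ≠ p.2.2 ∧ PySem.Chars.lowerChar p.2.2 ∈ ['a', 'g', 't', 'c', '-'] then
      some (String.ofList (PySem.Int.toChars (p.1 + 1 - ((PySem.List.slice r none (some (p.1 + 1))).count '-' : Int)) ++ [PySem.Chars.upperChar p.2.1, PySem.Chars.upperChar p.2.2]))
    else none)

-- ===== PRECONDITION & SPEC =====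
-- Pre_ excludes member shorter than ref: there A raises IndexError at member[i] (B's zip truncates instead).
def Pre_find_snps (ref : String) (member : String) : Prop :=
  ref.toList.length ≤ member.toList.length
instance (ref : String) (member : String) : Decidable (Pre_find_snps ref member) := by unfold Pre_find_snps; infer_instance
def pvWitness_find_snps : String × String := ("A-GT", "AAG-")

def Spec_find_snps (ref : String) (member : String) (out : List String) : Prop := out = find_snps_alt ref member
instance (ref : String) (member : String) (out : List String) : Decidable (Spec_find_snps ref member out) := by unfold Spec_find_snps; infer_instance

-- ===== CLAIM (what is proved, stated in full; the proofs are below) =====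
def Claim_equal_find_snps : Prop := ∀ (ref : String) (member : String), Dom_find_snps ref member → Pre_find_snps ref member → Spec_find_snps ref member (find_snps ref member)

-- ===== LEMMAS AND PROOFS =====

lemma pv_set_pair_len (a b : Char) : ((PySem.Set.ofList [a, b]).length > 1) ↔ a ≠ b := by
  by_cases h : a = b
  · simp [PySem.Set.ofList, PySem.Set.add, h]
  · simp [PySem.Set.ofList, PySem.Set.add, h, Ne.symm h]

lemma pv_key (full : List Char) : ∀ (cs ds : List Char) (p : List Char) (acc : List String) (n : Int),
    full = p ++ cs → n = (p.length : Int) - (p.count '-' : Int) → cs.length ≤ ds.length →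
    ((List.range cs.length).foldl
      (fun (st : List String × Int) (k : Nat) =>
        let index := if cs.getD k ' ' ≠ '-' then st.2 + 1 else st.2
        let c0 := cs.getD k ' '
        let c1 := ds.getD k ' '
        if (PySem.Set.ofList [c0, c1]).length > 1 then
          if ¬ (PySem.Chars.lowerChar c1 ∈ ['a', 'g', 't', 'c', '-']) then
            (st.1, index)
          else
            (st.1 ++ [String.ofList (PySem.Int.toChars index ++ [PySem.Chars.upperChar c0, PySem.Chars.upperChar c1])], index)
        else (st.1, index))
      (acc, n)).1
    = acc ++ (PySem.List.enumerate (cs.zip ds) (p.length : Int)).filterMap (fun q =>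
        if q.2.1 ≠ q.2.2 ∧ PySem.Chars.lowerChar q.2.2 ∈ ['a', 'g', 't', 'c', '-'] then
          some (String.ofList (PySem.Int.toChars (q.1 + 1 - ((PySem.List.slice full none (some (q.1 + 1))).count '-' : Int)) ++ [PySem.Chars.upperChar q.2.1, PySem.Chars.upperChar q.2.2]))
        else none) := by
  intro cs
  induction cs with
  | nil => intro ds p acc n _ _ _; simp
  | cons c cs ih =>
    intro ds p acc n hfull hn h
    cases ds with
    | nil => simp at h
    | cons d ds =>
      simp only [List.length_cons, List.range_succ_eq_map, List.foldl_cons, List.foldl_map]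
      simp only [List.getD_cons_zero, List.getD_cons_succ]
      simp only [List.zip_cons_cons, PySem.List.enumerate_cons, List.filterMap_cons]
      have hslice : PySem.List.slice full none (some ((p.length : Int) + 1)) = p ++ [c] := by
        have h1 : ((p.length : Int) + 1) = ((p.length + 1 : Nat) : Int) := by push_cast; ring
        rw [h1, PySem.List.slice_to_natCast, hfull, List.take_append]
        simp
      have hidx : (p.length : Int) + 1 - (((PySem.List.slice full none (some ((p.length : Int) + 1))).count '-' : Nat) : Int)
          = (if c ≠ '-' then n + 1 else n) := by
        rw [hslice]
        by_cases hc : c = '-' <;> simp [List.count_append, hc, hn] <;> omega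
      have hn' : (if c ≠ '-' then n + 1 else n) = (((p ++ [c]).length : Nat) : Int) - (((p ++ [c]).count '-' : Nat) : Int) := by
        by_cases hc : c = '-' <;> simp [List.count_append, hc, hn] <;> omega
      have hfull' : full = (p ++ [c]) ++ cs := by simp [hfull]
      have hlen : (((p ++ [c]).length : Nat) : Int) = (p.length : Int) + 1 := by simp
      have hh : cs.length ≤ ds.length := by simpa using h
      by_cases hcd : c = d
      · have hset : ¬ ((PySem.Set.ofList [c, d]).length > 1) := by simp [pv_set_pair_len, hcd]
        have hB : ¬ (¬ c = d ∧ PySem.Chars.lowerChar d ∈ ['a', 'g', 't', 'c', '-']) := by simp [hcd]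
        simp only [if_neg hset, if_neg hB]
        rw [ih ds (p ++ [c]) acc _ hfull' hn' hh, hlen]
      · have hset : (PySem.Set.ofList [c, d]).length > 1 := (pv_set_pair_len c d).mpr hcd
        by_cases hm : PySem.Chars.lowerChar d ∈ ['a', 'g', 't', 'c', '-']
        · have hB : (¬ c = d ∧ PySem.Chars.lowerChar d ∈ ['a', 'g', 't', 'c', '-']) := ⟨hcd, hm⟩
          simp only [if_pos hset, if_pos hB, if_neg (by simp [hm] : ¬ PySem.Chars.lowerChar d ∉ ['a', 'g', 't', 'c', '-'])]
          rw [ih ds (p ++ [c]) _ _ hfull' hn' hh, hlen]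
          simp [hidx]
        · have hB : ¬ (¬ c = d ∧ PySem.Chars.lowerChar d ∈ ['a', 'g', 't', 'c', '-']) := by simp [hm]
          simp only [if_pos hset, if_neg hB, if_pos (by simp [hm] : PySem.Chars.lowerChar d ∉ ['a', 'g', 't', 'c', '-'])]
          rw [ih ds (p ++ [c]) acc _ hfull' hn' hh, hlen]

-- ===== VERDICT (by name: the statement is the Claim_ definition above) =====
theorem find_snps_spec : Claim_equal_find_snps := by
  intro ref member _ hpre
  unfold Spec_find_snps find_snps find_snps_alt
  simp only [PySem.List.pyRange_one, sub_zero, Int.toNat_natCast, List.foldl_map, zero_add,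
    PySem.List.pyGetD_natCast]
  simpa using pv_key ref.toList ref.toList member.toList [] [] 0 (by simp) (by simp) hpre
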